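-- pv_equiv track=rewrite | github.com/eilishnewmark/simulating_language | lab2_word_learning.py | get_hypothesis_space
-- ===== SOURCE A (Python) =====
-- def get_hypothesis_space(no_entities_in_world, no_poss_entities_per_meaning):
--     all_entities = [i for i in range(0, no_entities_in_world)]
--
--
--     all_hypotheses = []
--     for i in range(0, len(all_entities)):
--         for j in range(0, no_poss_entities_per_meaning):
--             if i + j <= 10:
--                 all_hypotheses.append(set(range(i, i + j + 1)))
--
--     all_hypotheses = sorted(all_hypotheses, key=lambda x: len(x))
--
--     return all_hypotheses
-- ===== SOURCE B (Python) =====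
-- def get_hypothesis_space(no_entities_in_world, no_poss_entities_per_meaning):
--     # Every hypothesis is a contiguous block of `size` entities starting at `start`;
--     # a block of that size exists for start in [0, min(n, 12 - size)) (the i+j<=10
--     # guard means start <= 11 - size), and emitting size-by-size reproduces the
--     # stable sorted-by-length order of A with no sort and no dead iterations.
--     return [set(range(start, start + size))
--             for size in range(1, min(no_poss_entities_per_meaning, 11) + 1)
--             for start in range(0, min(no_entities_in_world, 12 - size))]
-- ===== Notes on version B (the rewrite author's own statement) =====
-- stated objective: faster
-- what changed: B is a single flat comprehension over (size, start) pairs: a hypothesis is the contiguous block [start, start+size), with the start range bounded by min(n, 12-size) derived from the i+j<=10 guard, so the nested guarded loops, the dead iterations past size 11 and the final sort all disappear.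
import Mathlib
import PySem

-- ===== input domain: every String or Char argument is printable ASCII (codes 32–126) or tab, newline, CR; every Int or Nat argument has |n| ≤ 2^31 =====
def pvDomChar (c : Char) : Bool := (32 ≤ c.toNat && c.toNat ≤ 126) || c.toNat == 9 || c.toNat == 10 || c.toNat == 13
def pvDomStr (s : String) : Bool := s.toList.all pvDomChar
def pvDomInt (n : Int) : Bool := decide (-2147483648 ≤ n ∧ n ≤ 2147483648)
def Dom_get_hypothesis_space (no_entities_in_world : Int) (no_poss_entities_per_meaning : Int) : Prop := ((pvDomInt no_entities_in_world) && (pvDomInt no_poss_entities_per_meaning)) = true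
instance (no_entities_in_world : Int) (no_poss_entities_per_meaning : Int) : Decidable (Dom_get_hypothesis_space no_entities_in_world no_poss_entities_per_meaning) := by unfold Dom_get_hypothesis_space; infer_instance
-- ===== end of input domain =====

-- B enumerates hypotheses as contiguous blocks over (size, start) pairs in one flat comprehension, with the start bound min(n, 12-size) derived from the i+j<=10 guard, so the guard, the dead iterations and the final sort disappear; objective: faster (measured).

-- ===== PORT A =====
def get_hypothesis_space (no_entities_in_world : Int) (no_poss_entities_per_meaning : Int) : List (List Int) :=
  let all_entities : List Int := PySem.List.pyRange 0 no_entities_in_world 1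
  let all_hypotheses : List (List Int) :=
    (PySem.List.pyRange 0 (all_entities.length : Int) 1).foldl (fun acc i =>
      (PySem.List.pyRange 0 no_poss_entities_per_meaning 1).foldl (fun acc j =>
        if i + j ≤ 10 then acc ++ [PySem.Set.ofList (PySem.List.pyRange i (i + j + 1) 1)] else acc)
        acc) []
  PySem.List.sorted all_hypotheses (fun x => x.length) false

-- ===== PORT B =====
def get_hypothesis_space_alt (no_entities_in_world : Int) (no_poss_entities_per_meaning : Int) : List (List Int) :=
  (PySem.List.pyRange 1 (min no_poss_entities_per_meaning 11 + 1) 1).flatMap (fun size =>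
    (PySem.List.pyRange 0 (min no_entities_in_world (12 - size)) 1).map (fun start =>
      PySem.Set.ofList (PySem.List.pyRange start (start + size) 1)))

-- ===== PRECONDITION & SPEC =====
def Spec_get_hypothesis_space (no_entities_in_world : Int) (no_poss_entities_per_meaning : Int) (out : List (List Int)) : Prop := out = get_hypothesis_space_alt no_entities_in_world no_poss_entities_per_meaning
instance (no_entities_in_world : Int) (no_poss_entities_per_meaning : Int) (out : List (List Int)) : Decidable (Spec_get_hypothesis_space no_entities_in_world no_poss_entities_per_meaning out) := by unfold Spec_get_hypothesis_space; infer_instance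

-- ===== CLAIM (what is proved, stated in full; the proofs are below) =====
def Claim_equal_get_hypothesis_space : Prop := ∀ (no_entities_in_world : Int) (no_poss_entities_per_meaning : Int), Dom_get_hypothesis_space no_entities_in_world no_poss_entities_per_meaning → Spec_get_hypothesis_space no_entities_in_world no_poss_entities_per_meaning (get_hypothesis_space no_entities_in_world no_poss_entities_per_meaning)

-- ===== LEMMAS AND PROOFS =====

-- the hypothesis built from the pair (i, j)
def pvHyp (i j : Int) : List Int := PySem.Set.ofList (PySem.List.pyRange i (i + j + 1) 1)

-- clamp an argument to [0, 11]; thanks to the 'i + j <= 10' guard the result only depends on the clamps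
def pvClamp (x : Int) : Int := if x < 0 then 0 else min x 11

lemma pvClamp_range (x : Int) : 0 ≤ pvClamp x ∧ pvClamp x ≤ 11 := by
  unfold pvClamp; split <;> omega

-- A's value, characterised as a sort of a flatMap
lemma A_char (n m : Int) :
    get_hypothesis_space n m =
      PySem.List.sorted
        ((PySem.List.pyRange 0 n 1).flatMap (fun i =>
          ((PySem.List.pyRange 0 m 1).filter (fun j => decide (i + j ≤ 10))).map (pvHyp i)))
        (fun x => x.length) false := by
  unfold get_hypothesis_space
  have hlen : PySem.List.pyRange 0 (((PySem.List.pyRange 0 n 1).length : Nat) : Int) 1 =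
      PySem.List.pyRange 0 n 1 := by
    rw [PySem.List.length_pyRange_one, PySem.List.pyRange_one, PySem.List.pyRange_one]
    have : ((((n - 0).toNat : Nat) : Int) - 0).toNat = (n - 0).toNat := by omega
    rw [this]
  simp only [hlen]
  congr 1
  rw [PySem.List.foldl_congr_mem _ _
      (fun acc i => acc ++ ((PySem.List.pyRange 0 m 1).filter (fun j => decide (i + j ≤ 10))).map (pvHyp i)) []
      (by
        intro acc i _
        exact PySem.List.foldl_append_ite (fun j => i + j ≤ 10) (fun j => pvHyp i j) _ acc)]
  rw [PySem.List.foldl_append_eq_flatMap]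
  simp

-- the guarded filter over a range only sees indices ≤ 10, so the range bound may be clamped
lemma filter_range_clamp (c x : Int) (_hc : 0 ≤ c) (p : Int → Int → Prop) [∀ a b, Decidable (p a b)]
    (hp : ∀ y, 11 ≤ y → ¬ p c y) :
    (PySem.List.pyRange 0 x 1).filter (fun y => decide (p c y)) =
      (PySem.List.pyRange 0 (pvClamp x) 1).filter (fun y => decide (p c y)) := by
  rcases lt_or_ge x 0 with h | h
  · have h1 : PySem.List.pyRange 0 x 1 = [] := by
      rw [PySem.List.pyRange_one]
      simp
      omega
    have h2 : pvClamp x = 0 := by unfold pvClamp; omega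
    rw [h1, h2, PySem.List.pyRange_one]; simp
  · have hcl : pvClamp x = min x 11 := by unfold pvClamp; omega
    rw [hcl]
    rw [PySem.List.pyRange_one_append 0 (min x 11) x (by omega) (by omega), List.filter_append]
    have : (PySem.List.pyRange (min x 11) x 1).filter (fun y => decide (p c y)) = [] := by
      apply List.filter_eq_nil_iff.mpr
      intro y hy
      have hmem := PySem.List.mem_pyRange_one.mp hy
      have : 11 ≤ y := by omega
      simpa using hp y this
    rw [this, List.append_nil]

-- a flatMap whose body vanishes from 11 on may clamp its range bound
lemma flatMap_range_clamp (x : Int) (F : Int → List (List Int)) (hF : ∀ y, 11 ≤ y → F y = []) :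
    (PySem.List.pyRange 0 x 1).flatMap F = (PySem.List.pyRange 0 (pvClamp x) 1).flatMap F := by
  rcases lt_or_ge x 0 with h | h
  · have h1 : PySem.List.pyRange 0 x 1 = [] := by
      rw [PySem.List.pyRange_one]
      simp
      omega
    have h2 : pvClamp x = 0 := by unfold pvClamp; omega
    rw [h1, h2, PySem.List.pyRange_one]; simp
  · have hcl : pvClamp x = min x 11 := by unfold pvClamp; omega
    rw [hcl]
    rw [PySem.List.pyRange_one_append 0 (min x 11) x (by omega) (by omega), List.flatMap_append]
    have : (PySem.List.pyRange (min x 11) x 1).flatMap F = [] := by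
      apply List.flatMap_eq_nil_iff.mpr
      intro y hy
      have hmem := PySem.List.mem_pyRange_one.mp hy
      exact hF y (by omega)
    rw [this, List.append_nil]

-- A's value depends only on the clamped arguments
lemma A_clamp (n m : Int) :
    get_hypothesis_space n m = get_hypothesis_space (pvClamp n) (pvClamp m) := by
  rw [A_char, A_char]
  congr 1
  rw [flatMap_range_clamp n _ (by
    intro i hi
    apply List.map_eq_nil_iff.mpr
    apply List.filter_eq_nil_iff.mpr
    intro j hj
    have hmem := PySem.List.mem_pyRange_one.mp hj
    simp; omega)]
  apply List.flatMap_congr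
  intro i hi
  have hmem := PySem.List.mem_pyRange_one.mp hi
  rw [filter_range_clamp i m hmem.1 (fun a b => a + b ≤ 10) (by intro y hy; omega)]

-- B's value depends only on the clamped arguments
lemma B_clamp (n m : Int) :
    get_hypothesis_space_alt n m = get_hypothesis_space_alt (pvClamp n) (pvClamp m) := by
  unfold get_hypothesis_space_alt
  have houter : PySem.List.pyRange 1 (min m 11 + 1) 1 =
      PySem.List.pyRange 1 (min (pvClamp m) 11 + 1) 1 := by
    rcases lt_or_ge m 0 with h | h
    · rw [PySem.List.pyRange_one_eq_nil (by omega),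
          PySem.List.pyRange_one_eq_nil (by unfold pvClamp; omega)]
    · have : min (pvClamp m) 11 = min m 11 := by unfold pvClamp; omega
      rw [this]
  rw [houter]
  apply List.flatMap_congr
  intro size hs
  have hmem := PySem.List.mem_pyRange_one.mp hs
  have h2 : size ≤ 11 := by
    have := pvClamp_range m
    omega
  have hinner : PySem.List.pyRange 0 (min n (12 - size)) 1 =
      PySem.List.pyRange 0 (min (pvClamp n) (12 - size)) 1 := by
    rcases lt_or_ge n 0 with h | h
    · rw [PySem.List.pyRange_one_eq_nil (by omega),
          PySem.List.pyRange_one_eq_nil (by unfold pvClamp; omega)]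
    · have : min (pvClamp n) (12 - size) = min n (12 - size) := by unfold pvClamp; omega
      rw [this]
  rw [hinner]

-- the finite check on the clamped grid [0,11] × [0,11]
def pvChk : Bool :=
  (List.range 12).all fun a => (List.range 12).all fun b =>
    get_hypothesis_space (a : Int) (b : Int) == get_hypothesis_space_alt (a : Int) (b : Int)

set_option maxRecDepth 40000 in
lemma pvChk_true : pvChk = true := by rfl

lemma grid_eq (a b : Nat) (ha : a < 12) (hb : b < 12) :
    get_hypothesis_space (a : Int) (b : Int) = get_hypothesis_space_alt (a : Int) (b : Int) := by
  have h := pvChk_true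
  unfold pvChk at h
  rw [List.all_eq_true] at h
  have ha' := h a (List.mem_range.mpr ha)
  rw [List.all_eq_true] at ha'
  have hb' := ha' b (List.mem_range.mpr hb)
  exact eq_of_beq hb'

-- ===== VERDICT (by name: the statement is the Claim_ definition above) =====
theorem get_hypothesis_space_spec : Claim_equal_get_hypothesis_space := by
  intro n m _
  unfold Spec_get_hypothesis_space
  rw [A_clamp, B_clamp]
  have hn := pvClamp_range n
  have hm := pvClamp_range m
  have h1 : pvClamp n = ((pvClamp n).toNat : Int) := by omega
  have h2 : pvClamp m = ((pvClamp m).toNat : Int) := by omega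
  rw [h1, h2]
  exact grid_eq _ _ (by omega) (by omega)
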